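-- pv_equiv track=rewrite | github.com/csh-1997-eng/gis-phl | ingestion/ontology/map_to_entities.py | zori_geographic_entities
-- ===== SOURCE A (Python) =====
-- from typing import Any, Dict, Iterable, List
--
-- def unique_by_key(rows: Iterable[Dict[str, Any]], key: str) -> List[Dict[str, Any]]:
--     seen = set()
--     deduped: List[Dict[str, Any]] = []
--     for row in rows:
--         value = row.get(key)
--         if value in seen:
--             continue
--         seen.add(value)
--         deduped.append(row)
--     return deduped
--
-- def zori_geographic_entities(apartment_market_rows: Iterable[Dict[str, Any]]) -> List[Dict[str, Any]]:
--     output: List[Dict[str, Any]] = []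
--     for row in apartment_market_rows:
--         geo_id = str(row.get("geography_entity_id", "")).strip()
--         if not geo_id:
--             continue
--         output.append(
--             {
--                 "entity_id": geo_id,
--                 "geography_type": "zori_region",
--                 "name": geo_id.replace("geo:zori:", "").replace("_", " ").title(),
--                 "county_fips": None,
--                 "state_fips": None,
--             }
--         )
--     return unique_by_key(output, "entity_id")
-- ===== SOURCE B (Python) =====
-- from typing import Any, Dict, Iterable, List
--
-- def zori_geographic_entities(apartment_market_rows: Iterable[Dict[str, Any]]) -> List[Dict[str, Any]]:
--     # Single fused pass: dedup by geo_id while building, no intermediate list.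
--     seen = set()
--     result: List[Dict[str, Any]] = []
--     for row in apartment_market_rows:
--         geo_id = str(row.get("geography_entity_id", "")).strip()
--         if not geo_id or geo_id in seen:
--             continue
--         seen.add(geo_id)
--         result.append(
--             {
--                 "entity_id": geo_id,
--                 "geography_type": "zori_region",
--                 "name": geo_id.replace("geo:zori:", "").replace("_", " ").title(),
--                 "county_fips": None,
--                 "state_fips": None,
--             }
--         )
--     return result
-- ===== Notes on version B (the rewrite author's own statement) =====
-- stated objective: simpler
-- what changed: Fuses A's build pass and the separate unique_by_key dedup pass into one loop that keeps a set of geo_ids and appends each entity at most once, removing the intermediate full list and the second traversal.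
import Mathlib
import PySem

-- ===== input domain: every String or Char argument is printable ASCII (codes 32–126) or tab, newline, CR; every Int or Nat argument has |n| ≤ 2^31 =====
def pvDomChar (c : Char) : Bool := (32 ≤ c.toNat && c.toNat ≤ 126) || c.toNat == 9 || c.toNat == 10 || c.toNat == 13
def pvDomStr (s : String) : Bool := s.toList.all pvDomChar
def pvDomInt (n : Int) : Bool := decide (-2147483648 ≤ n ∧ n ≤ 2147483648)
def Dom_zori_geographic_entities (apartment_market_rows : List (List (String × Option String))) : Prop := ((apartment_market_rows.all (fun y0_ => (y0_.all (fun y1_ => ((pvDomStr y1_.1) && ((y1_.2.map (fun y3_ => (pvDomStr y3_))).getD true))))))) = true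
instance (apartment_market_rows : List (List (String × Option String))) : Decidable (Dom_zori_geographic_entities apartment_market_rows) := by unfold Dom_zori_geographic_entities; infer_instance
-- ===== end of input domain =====

-- B fuses A's build pass and its separate unique_by_key dedup pass into one loop over the rows (simpler; same cost).


-- ===== shared helpers (Python built-ins used identically by both sources) =====

-- str.title(), ported by hand (exact on the ASCII domain: 'cased' = isalpha there)
def pvTitleGo : Bool → List Char → List Char
  | _, [] => []
  | prevAlpha, c :: cs =>
    if PySem.Chars.isalpha c then
      (if prevAlpha then PySem.Chars.lowerChar c else PySem.Chars.upperChar c) :: pvTitleGo true cs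
    else
      c :: pvTitleGo false cs

def pvTitle (s : String) : String := String.ofList (pvTitleGo false s.toList)

-- str(row.get("geography_entity_id", "")).strip() : missing key -> "", value None -> "None"
def pvGeoId (row : List (String × Option String)) : String :=
  PySem.Str.strip
    (match (PySem.Dict.mk row).get? "geography_entity_id" with
     | none => ""
     | some none => "None"
     | some (some s) => s)

-- the entity dict built from one geo_id (identical literal in both sources)
def pvEntity (g : String) : List (String × Option String) :=
  [("entity_id", some g),
   ("geography_type", some "zori_region"),
   ("name", some (pvTitle (PySem.Str.replace (PySem.Str.replace g "geo:zori:" "") "_" " "))),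
   ("county_fips", none),
   ("state_fips", none)]

-- ===== PORT A =====

-- the build loop of A: append an entity for every non-empty geo_id
def pvBuild : List (List (String × Option String)) → List (List (String × Option String))
  | [] => []
  | row :: rest =>
    let g := pvGeoId row
    if g = "" then pvBuild rest else pvEntity g :: pvBuild rest

-- unique_by_key's loop: seen is a set of row.get(key) values (Option (Option String))
def pvUniqueGo (key : String) :
    List (List (String × Option String)) → PySem.Set (Option (Option String)) →
    List (List (String × Option String))
  | [], _ => []
  | row :: rest, seen =>
    let v := (PySem.Dict.mk row).get? key
    if seen.contains v then pvUniqueGo key rest seen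
    else row :: pvUniqueGo key rest (seen.add v)

def zori_geographic_entities (apartment_market_rows : List (List (String × Option String))) : List (List (String × Option String)) :=
  pvUniqueGo "entity_id" (pvBuild apartment_market_rows) PySem.Set.empty

-- ===== PORT B =====

-- B's single fused loop: seen is a set of geo_id strings; filter, dedup and build at once
def pvAltGo : List (List (String × Option String)) → PySem.Set String →
    List (List (String × Option String))
  | [], _ => []
  | row :: rest, seen =>
    let g := pvGeoId row
    if g = "" || seen.contains g then pvAltGo rest seen
    else pvEntity g :: pvAltGo rest (seen.add g)

def zori_geographic_entities_alt (apartment_market_rows : List (List (String × Option String))) : List (List (String × Option String)) :=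
  pvAltGo apartment_market_rows PySem.Set.empty

-- ===== PRECONDITION & SPEC =====
def Spec_zori_geographic_entities (apartment_market_rows : List (List (String × Option String))) (out : List (List (String × Option String))) : Prop := out = zori_geographic_entities_alt apartment_market_rows
instance (apartment_market_rows : List (List (String × Option String))) (out : List (List (String × Option String))) : Decidable (Spec_zori_geographic_entities apartment_market_rows out) := by unfold Spec_zori_geographic_entities; infer_instance

-- ===== CLAIM =====
def Claim_equal_zori_geographic_entities : Prop := ∀ (apartment_market_rows : List (List (String × Option String))), Dom_zori_geographic_entities apartment_market_rows → Spec_zori_geographic_entities apartment_market_rows (zori_geographic_entities apartment_market_rows)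

-- ===== LEMMAS AND PROOFS =====

theorem pvEntity_get_id (g : String) :
    (PySem.Dict.mk (pvEntity g)).get? "entity_id" = some (some g) := by
  simp [pvEntity, PySem.Dict.get?_mk_cons]

theorem contains_add {α : Type} [BEq α] [LawfulBEq α] (s : PySem.Set α) (x y : α) :
    (s.add x).contains y = (s.contains y || x == y) := by
  by_cases hx : s.contains x
  · simp only [PySem.Set.add, hx, if_pos]
    by_cases hxy : x = y
    · subst hxy
      simp only [beq_self_eq_true, Bool.or_true]
      simpa using hx
    · simp [beq_eq_false_iff_ne.2 hxy]
  · simp only [PySem.Set.add, hx, Bool.false_eq_true, if_neg, not_false_iff]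
    by_cases hxy : y = x
    · subst hxy; simp
    · simp [hxy, beq_eq_false_iff_ne.2 (Ne.symm hxy)]

-- core invariant: A's dedup over the built list equals B's fused loop, whenever the two
-- seen-sets agree on wrapped geo_ids
theorem pvGo_eq (rows : List (List (String × Option String)))
    (sA : PySem.Set (Option (Option String))) (sB : PySem.Set String)
    (h : ∀ g : String, sA.contains (some (some g)) = sB.contains g) :
    pvUniqueGo "entity_id" (pvBuild rows) sA = pvAltGo rows sB := by
  induction rows generalizing sA sB with
  | nil => simp [pvBuild, pvUniqueGo, pvAltGo]
  | cons row rest ih =>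
    simp only [pvBuild, pvAltGo]
    by_cases hg : pvGeoId row = ""
    · simp only [hg, if_pos]
      rw [if_pos (by simp)]
      exact ih sA sB h
    · simp only [if_neg hg]
      have hB : (pvGeoId row = "" || sB.contains (pvGeoId row)) = sB.contains (pvGeoId row) := by
        simp [hg]
      rw [hB]
      simp only [pvUniqueGo, pvEntity_get_id]
      rw [h (pvGeoId row)]
      by_cases hc : sB.contains (pvGeoId row)
      · simp only [hc, if_pos]
        exact ih sA sB h
      · simp only [hc, Bool.false_eq_true, if_neg, not_false_iff]
        congr 1
        apply ih
        intro g
        rw [contains_add, contains_add, h g]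
        by_cases hgg : pvGeoId row = g
        · subst hgg; simp
        · simp [beq_eq_false_iff_ne.2 hgg]


-- ===== VERDICT =====
theorem zori_geographic_entities_spec : Claim_equal_zori_geographic_entities := by
  intro rows _
  unfold Spec_zori_geographic_entities zori_geographic_entities zori_geographic_entities_alt
  exact pvGo_eq rows PySem.Set.empty PySem.Set.empty (fun g => rfl)
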